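-- pv_equiv track=rewrite | github.com/Pmitrega/Algorithms_and_data_structures | lab8/bonus/shell_sort_and_magic_five_sort.py | get_medians
-- ===== SOURCE A (Python) =====
-- from typing import List
--
-- def median_3(a, b, c):
--     return max(min(a, b), min(c, max(a, b)))
--
-- def median_5(a, b, c, d, e):
--     f = max(min(a, b), min(c, d))  # usuwa najmniejsza z 4
--     g = min(max(a, b), max(c, d))  # usuwa największą z 4
--     return median_3(e, f, g)
--
-- def median_less_than_5(lst: List):
--     if len(lst) == 4:
--         return min(max(lst[0], lst[1]), max(lst[2], lst[3]))
--     elif len(lst) == 3: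
--         return median_3(lst[0], lst[1], lst[2])
--     elif len(lst) == 2 or len(lst) == 1:
--         return lst[0]
--
-- def get_medians(lst_of_lsts):
--     median_lst = []
--     for lst in lst_of_lsts:
--         if len(lst) == 5:
--             median_lst.append(median_5(lst[0], lst[1], lst[2], lst[3], lst[4]))
--         else:
--             median_lst.append(median_less_than_5(lst))
--
--
--     return  median_lst
-- ===== SOURCE B (Python) =====
-- def _median(lst):
--     # lengths 3 and 5: lower median by sort-then-index; length 4 keeps the
--     # pairing formula (the task's chosen value there depends on element order,
--     # so it is not an order statistic); lengths 1 and 2 yield the first element.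
--     n = len(lst)
--     if n <= 2:
--         return lst[0] if lst else None
--     if n == 4:
--         return min(max(lst[0], lst[1]), max(lst[2], lst[3]))
--     if n == 3 or n == 5:
--         return sorted(lst)[(n - 1) // 2]
--     return None
--
-- def get_medians(lst_of_lsts):
--     return [_median(lst) for lst in lst_of_lsts]
-- ===== Notes on version B (the rewrite author's own statement) =====
-- stated objective: idiomatic
-- what changed: Replaces the hand-written min/max comparator networks (median_3, median_5) and the accumulator loop with a per-sublist helper mapped over the input that finds the median of 3- and 5-element sublists by sort-then-index.
-- outside the precondition, e.g. on get_medians([[], [1]]): A returns [None, 1], B returns [None, 1]; on get_medians([[1, 2, 3, 4, 5, 6]]): A returns [None], B returns [None]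
import Mathlib
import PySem

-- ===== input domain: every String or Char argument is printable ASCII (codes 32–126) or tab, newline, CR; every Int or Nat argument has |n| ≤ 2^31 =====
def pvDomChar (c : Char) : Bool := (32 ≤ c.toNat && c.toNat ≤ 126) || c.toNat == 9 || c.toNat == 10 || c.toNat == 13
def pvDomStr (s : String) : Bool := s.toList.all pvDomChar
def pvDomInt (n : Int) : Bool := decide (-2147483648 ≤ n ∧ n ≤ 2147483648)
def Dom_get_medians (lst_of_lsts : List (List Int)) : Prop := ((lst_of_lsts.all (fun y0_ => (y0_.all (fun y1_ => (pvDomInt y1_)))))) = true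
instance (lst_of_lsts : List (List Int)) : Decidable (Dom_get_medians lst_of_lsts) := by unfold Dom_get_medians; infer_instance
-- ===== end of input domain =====

-- B replaces A's min/max comparator networks and append loop with a per-sublist
-- helper, mapped over the input, that takes medians of 3/5-element sublists by
-- sort-then-index; return values are proved equal on Pre_ (lengths 1..5).


-- ===== PORT A =====
def median_3 (a b c : Int) : Int := max (min a b) (min c (max a b))

def median_5 (a b c d e : Int) : Int :=
  let f := max (min a b) (min c d)
  let g := min (max a b) (max c d)
  median_3 e f g

-- Python returns None when no branch fires (length 0 or > 4) → none here; each
-- index is in range because its branch fixes the length, so `.getD 0` never defaults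
def median_less_than_5 (lst : List Int) : Option Int :=
  if lst.length == 4 then
    some (min (max ((PySem.List.pyGet? lst 0).getD 0) ((PySem.List.pyGet? lst 1).getD 0))
              (max ((PySem.List.pyGet? lst 2).getD 0) ((PySem.List.pyGet? lst 3).getD 0)))
  else if lst.length == 3 then
    some (median_3 ((PySem.List.pyGet? lst 0).getD 0) ((PySem.List.pyGet? lst 1).getD 0)
                   ((PySem.List.pyGet? lst 2).getD 0))
  else if lst.length == 2 || lst.length == 1 then
    some ((PySem.List.pyGet? lst 0).getD 0)
  else none

-- Python appends None when the helper returns None; that happens only outside Pre_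
-- (the Python result is then not a list of ints), where `.getD 0` stands in
def get_medians (lst_of_lsts : List (List Int)) : List Int :=
  lst_of_lsts.foldl (fun median_lst lst =>
    if lst.length == 5 then
      median_lst ++ [median_5 ((PySem.List.pyGet? lst 0).getD 0) ((PySem.List.pyGet? lst 1).getD 0)
                              ((PySem.List.pyGet? lst 2).getD 0) ((PySem.List.pyGet? lst 3).getD 0)
                              ((PySem.List.pyGet? lst 4).getD 0)]
    else
      median_lst ++ [(median_less_than_5 lst).getD 0]) []

-- ===== PORT B =====
-- `lst[0] if lst else None` is head?; lengths 3/5 sort then take index (n-1)//2;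
-- the `none` branches occur only outside Pre_ (Python's None), `.getD 0` stands in
def pvMedian (lst : List Int) : Option Int :=
  let n : Int := (lst.length : Int)
  if n ≤ 2 then lst.head?
  else if n == 4 then
    some (min (max ((PySem.List.pyGet? lst 0).getD 0) ((PySem.List.pyGet? lst 1).getD 0))
              (max ((PySem.List.pyGet? lst 2).getD 0) ((PySem.List.pyGet? lst 3).getD 0)))
  else if n == 3 || n == 5 then
    PySem.List.pyGet? (PySem.List.sorted lst (fun x => x) false) (PySem.Int.floordiv (n - 1) 2)
  else none

def get_medians_alt (lst_of_lsts : List (List Int)) : List Int :=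
  lst_of_lsts.map (fun lst => (pvMedian lst).getD 0)

-- ===== PRECONDITION & SPEC =====
-- Pre_ excludes sublists of length 0 or > 5: Python A appends None there (not an int),
-- so its result is not a value of the declared type List Int
def Pre_get_medians (lst_of_lsts : List (List Int)) : Prop :=
  ∀ lst ∈ lst_of_lsts, 1 ≤ lst.length ∧ lst.length ≤ 5
instance (lst_of_lsts : List (List Int)) : Decidable (Pre_get_medians lst_of_lsts) := by
  unfold Pre_get_medians; infer_instance
def pvWitness_get_medians : List (List Int) := [[3, 1, 2], [5, 4, 3, 2, 1], [7], [2, 9], [4, 1, 3, 2]]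

def Spec_get_medians (lst_of_lsts : List (List Int)) (out : List Int) : Prop := out = get_medians_alt lst_of_lsts
instance (lst_of_lsts : List (List Int)) (out : List Int) : Decidable (Spec_get_medians lst_of_lsts out) := by unfold Spec_get_medians; infer_instance

-- ===== CLAIM (what is proved, stated in full; the proofs are below) =====
def Claim_equal_get_medians : Prop := ∀ (lst_of_lsts : List (List Int)), Dom_get_medians lst_of_lsts → Pre_get_medians lst_of_lsts → Spec_get_medians lst_of_lsts (get_medians lst_of_lsts)

-- ===== LEMMAS AND PROOFS =====
-- sort-then-index results, as closed functions of the elements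
def pvS3 (a b c : Int) : Int :=
  (PySem.List.pyGet? (PySem.List.sorted [a, b, c] (fun x => x) false) 1).getD 0

def pvS5 (a b c d e : Int) : Int :=
  (PySem.List.pyGet? (PySem.List.sorted [a, b, c, d, e] (fun x => x) false) 2).getD 0

-- threshold map for the 0-1 principle: monotone, {0,1}-valued, commutes with min/max
def pvT (c x : Int) : Int := if x ≤ c then 0 else 1

theorem pvT_min (c x y : Int) : pvT c (min x y) = min (pvT c x) (pvT c y) := by
  simp only [pvT, min_def]; split_ifs <;> omega

theorem pvT_max (c x y : Int) : pvT c (max x y) = max (pvT c x) (pvT c y) := by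
  simp only [pvT, max_def]; split_ifs <;> omega

theorem pvT_01 (c x : Int) : pvT c x = 0 ∨ pvT c x = 1 := by
  unfold pvT; split_ifs <;> simp

theorem pvT_mono (c : Int) {x y : Int} (h : x ≤ y) : pvT c x ≤ pvT c y := by
  unfold pvT; split_ifs <;> omega

-- a monotone map commutes with sorting (uniqueness of the sorted rearrangement)
theorem sorted_map_pvT (c : Int) (xs : List Int) :
    PySem.List.sorted (xs.map (pvT c)) (fun x => x) false
      = (PySem.List.sorted xs (fun x => x) false).map (pvT c) := by
  apply PySem.List.sorted_id_eq_of_perm_of_pairwise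
  · exact (PySem.List.sorted_perm xs (fun x => x) false).map (pvT c)
  · exact (PySem.List.sorted_pairwise xs (fun x => x)).map (pvT c) (fun {a b} h => pvT_mono c h)

theorem exists3 (l : List Int) (h : l.length = 3) :
    ∃ y1 y2 y3, l = [y1, y2, y3] := by
  match l with
  | [y1, y2, y3] => exact ⟨y1, y2, y3, rfl⟩
  | [] | [_] | [_,_] => simp at h
  | _::_::_::_::_ => simp at h

theorem exists5 (l : List Int) (h : l.length = 5) :
    ∃ y1 y2 y3 y4 y5, l = [y1, y2, y3, y4, y5] := by
  match l with
  | [y1, y2, y3, y4, y5] => exact ⟨y1, y2, y3, y4, y5, rfl⟩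
  | [] | [_] | [_,_] | [_,_,_] | [_,_,_,_] => simp at h
  | _::_::_::_::_::_::_ => simp at h

theorem get1of3 (x1 x2 x3 : Int) :
    (PySem.List.pyGet? [x1, x2, x3] 1).getD 0 = x2 := by
  simp [PySem.List.pyGet?, PySem.List.pyIdx?]

theorem get2of5 (x1 x2 x3 x4 x5 : Int) :
    (PySem.List.pyGet? [x1, x2, x3, x4, x5] 2).getD 0 = x3 := by
  simp [PySem.List.pyGet?, PySem.List.pyIdx?]

-- the threshold map commutes with the sort-then-index selections …
theorem pvT_S3 (c a b c' : Int) :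
    pvT c (pvS3 a b c') = pvS3 (pvT c a) (pvT c b) (pvT c c') := by
  unfold pvS3
  have hmap : [pvT c a, pvT c b, pvT c c'] = [a, b, c'].map (pvT c) := rfl
  rw [hmap, sorted_map_pvT]
  obtain ⟨y1, y2, y3, hys⟩ :=
    exists3 (PySem.List.sorted [a, b, c'] (fun x => x) false)
      (by rw [PySem.List.length_sorted]; rfl)
  rw [hys]; simp only [List.map, get1of3]

theorem pvT_S5 (c a b c' d e : Int) :
    pvT c (pvS5 a b c' d e) = pvS5 (pvT c a) (pvT c b) (pvT c c') (pvT c d) (pvT c e) := by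
  unfold pvS5
  have hmap : [pvT c a, pvT c b, pvT c c', pvT c d, pvT c e] = [a, b, c', d, e].map (pvT c) := rfl
  rw [hmap, sorted_map_pvT]
  obtain ⟨y1, y2, y3, y4, y5, hys⟩ :=
    exists5 (PySem.List.sorted [a, b, c', d, e] (fun x => x) false)
      (by rw [PySem.List.length_sorted]; rfl)
  rw [hys]; simp only [List.map, get2of5]

-- … and with the comparator networks
theorem pvT_N3 (c a b c' : Int) :
    pvT c (median_3 a b c') = median_3 (pvT c a) (pvT c b) (pvT c c') := by
  simp only [median_3, pvT_min, pvT_max]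

theorem pvT_N5 (c a b c' d e : Int) :
    pvT c (median_5 a b c' d e) = median_5 (pvT c a) (pvT c b) (pvT c c') (pvT c d) (pvT c e) := by
  simp only [median_5, median_3, pvT_min, pvT_max]

-- selection = network on {0,1} inputs, by evaluation
theorem pv01_3 (a b c : Int) (ha : a = 0 ∨ a = 1) (hb : b = 0 ∨ b = 1) (hc : c = 0 ∨ c = 1) :
    pvS3 a b c = median_3 a b c := by
  rcases ha with rfl|rfl <;> rcases hb with rfl|rfl <;> rcases hc with rfl|rfl <;> decide

theorem pv01_5 (a b c d e : Int) (ha : a = 0 ∨ a = 1) (hb : b = 0 ∨ b = 1) (hc : c = 0 ∨ c = 1)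
    (hd : d = 0 ∨ d = 1) (he : e = 0 ∨ e = 1) : pvS5 a b c d e = median_5 a b c d e := by
  rcases ha with rfl|rfl <;> rcases hb with rfl|rfl <;> rcases hc with rfl|rfl <;>
    rcases hd with rfl|rfl <;> rcases he with rfl|rfl <;> decide

theorem pvT_eq3 (c a b c' : Int) :
    pvT c (pvS3 a b c') = pvT c (median_3 a b c') := by
  rw [pvT_S3, pvT_N3]
  exact pv01_3 _ _ _ (pvT_01 c a) (pvT_01 c b) (pvT_01 c c')

theorem pvT_eq5 (c a b c' d e : Int) :
    pvT c (pvS5 a b c' d e) = pvT c (median_5 a b c' d e) := by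
  rw [pvT_S5, pvT_N5]
  exact pv01_5 _ _ _ _ _ (pvT_01 c a) (pvT_01 c b) (pvT_01 c c') (pvT_01 c d) (pvT_01 c e)

-- 0-1 principle: thresholding at either value forces equality
theorem med3 (a b c : Int) : pvS3 a b c = median_3 a b c := by
  rcases lt_trichotomy (pvS3 a b c) (median_3 a b c) with h|h|h
  · have := pvT_eq3 (pvS3 a b c) a b c
    simp only [pvT] at this; split_ifs at this <;> omega
  · exact h
  · have := pvT_eq3 (median_3 a b c) a b c
    simp only [pvT] at this; split_ifs at this <;> omega

theorem med5 (a b c d e : Int) : pvS5 a b c d e = median_5 a b c d e := by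
  rcases lt_trichotomy (pvS5 a b c d e) (median_5 a b c d e) with h|h|h
  · have := pvT_eq5 (pvS5 a b c d e) a b c d e
    simp only [pvT] at this; split_ifs at this <;> omega
  · exact h
  · have := pvT_eq5 (median_5 a b c d e) a b c d e
    simp only [pvT] at this; split_ifs at this <;> omega

-- A's loop body as a single appended element
def pvAElem (lst : List Int) : Int :=
  if lst.length == 5 then
    median_5 ((PySem.List.pyGet? lst 0).getD 0) ((PySem.List.pyGet? lst 1).getD 0)
             ((PySem.List.pyGet? lst 2).getD 0) ((PySem.List.pyGet? lst 3).getD 0)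
             ((PySem.List.pyGet? lst 4).getD 0)
  else (median_less_than_5 lst).getD 0

theorem foldl_append_map (l : List (List Int)) (acc : List Int) :
    l.foldl (fun m lst => m ++ [pvAElem lst]) acc = acc ++ l.map pvAElem := by
  induction l generalizing acc with
  | nil => simp
  | cons x xs ih => simp [List.foldl, ih]

theorem get_medians_eq_map (l : List (List Int)) : get_medians l = l.map pvAElem := by
  have h : get_medians l = l.foldl (fun m lst => m ++ [pvAElem lst]) [] := by
    unfold get_medians
    congr 1
    funext m lst
    unfold pvAElem
    split <;> rfl
  rw [h, foldl_append_map]; rfl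

-- per-sublist agreement on lengths 1..5
theorem elem_agree (lst : List Int) (h1 : 1 ≤ lst.length) (h5 : lst.length ≤ 5) :
    pvAElem lst = (pvMedian lst).getD 0 := by
  match lst with
  | [] => simp at h1
  | [a] =>
      simp [pvAElem, pvMedian, median_less_than_5, PySem.List.pyGet?, PySem.List.pyIdx?]
  | [a, b] =>
      simp [pvAElem, pvMedian, median_less_than_5, PySem.List.pyGet?, PySem.List.pyIdx?]
  | [a, b, c] =>
      have := med3 a b c
      simp only [pvS3] at this
      simp [pvAElem, pvMedian, median_less_than_5, ← this,
        PySem.List.pyGet?, PySem.List.pyIdx?]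
  | [a, b, c, d] =>
      simp [pvAElem, pvMedian, median_less_than_5, PySem.List.pyGet?, PySem.List.pyIdx?]
  | [a, b, c, d, e] =>
      have := med5 a b c d e
      simp only [pvS5] at this
      simp [pvAElem, pvMedian, ← this, PySem.List.pyGet?, PySem.List.pyIdx?]
  | _::_::_::_::_::_::_ => simp at h5; omega

-- ===== VERDICT (by name: the statement is the Claim_ definition above) =====
theorem get_medians_spec : Claim_equal_get_medians := by
  intro l _hdom hpre
  unfold Spec_get_medians
  rw [get_medians_eq_map]
  unfold get_medians_alt
  exact List.map_congr_left (fun lst hmem =>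
    elem_agree lst (hpre lst hmem).1 (hpre lst hmem).2)
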